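-- pv_equiv track=rewrite | github.com/Themison-Portal/core-backend.V4 | app/services/agenticRag/utils/query_processing.py | create_query_variations
-- ===== SOURCE A (Python) =====
-- from typing import Any, Dict, List
--
-- def summarize_long_query(query: str, max_length: int = 200) -> str:
--     """
--     Summarize a very long query to its key points
--     This is useful for extremely long queries that might lose focus
--     """
--     if len(query) <= max_length:
--         return query
--
--     # Simple summarization: take first and last sentences
--     sentences = query.split('. ')
--     if len(sentences) <= 2:
--         return query[:max_length] + "..."
--
--     # Take first sentence and last sentence
--     summary = sentences[0] + ". " + sentences[-1]
--     if len(summary) > max_length: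
--         summary = summary[:max_length] + "..."
--
--     return summary
--
-- def extract_key_phrases(query: str) -> List[str]:
--     """
--     Extract key phrases from a query for targeted search
--     """
--     # Simple key phrase extraction (you could use NLP libraries for better results)
--     # Remove common stop words and extract meaningful phrases
--     stop_words = {'the', 'a', 'an', 'and', 'or', 'but', 'in', 'on', 'at', 'to', 'for', 'of', 'with', 'by'}
--
--     words = query.lower().split()
--     key_phrases = []
--     current_phrase = []
--
--     for word in words:
--         if word not in stop_words and len(word) > 2:
--             current_phrase.append(word)
--         elif current_phrase:
--             if len(current_phrase) >= 2:
--                 key_phrases.append(' '.join(current_phrase))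
--             current_phrase = []
--
--     # Add the last phrase if it exists
--     if current_phrase and len(current_phrase) >= 2:
--         key_phrases.append(' '.join(current_phrase))
--
--     return key_phrases
--
-- def create_query_variations(query: str) -> List[str]:
--     """
--     Create different variations of a query for better retrieval
--     """
--     variations = [query]
--
--     # Add key phrase variations
--     key_phrases = extract_key_phrases(query)
--     for phrase in key_phrases[:3]:  # Limit to top 3 phrases
--         variations.append(phrase)
--
--     # Add summarized version for very long queries
--     if len(query) > 500:
--         summary = summarize_long_query(query)
--         variations.append(summary)
--
--     return variations
-- ===== SOURCE B (Python) =====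
-- from typing import Any, Dict, List
--
-- _STOP_WORDS = {'the', 'a', 'an', 'and', 'or', 'but', 'in', 'on', 'at', 'to', 'for', 'of', 'with', 'by'}
--
--
-- def _keep(word: str) -> bool:
--     return word not in _STOP_WORDS and len(word) > 2
--
--
-- def _summarize(query: str, max_length: int = 200) -> str:
--     sentences = query.split('. ')
--     s = query if len(sentences) <= 2 else sentences[0] + '. ' + sentences[-1]
--     return s if len(s) <= max_length else s[:max_length] + '...'
--
--
-- def create_query_variations(query: str) -> List[str]:
--     words = query.lower().split()
--     # cut positions: indices of words that cannot belong to a phrase,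
--     # bracketed by virtual cuts at -1 and len(words)
--     cuts = [-1] + [i for i, w in enumerate(words) if not _keep(w)] + [len(words)]
--     # a phrase is the text strictly between two consecutive cuts,
--     # kept when it spans at least two words (j - i - 1 >= 2)
--     phrases = [' '.join(words[i + 1:j]) for i, j in zip(cuts, cuts[1:]) if j - i > 2]
--     variations = [query] + phrases[:3]
--     if len(query) > 500:
--         variations.append(_summarize(query))
--     return variations
-- ===== Notes on version B (the rewrite author's own statement) =====
-- stated objective: alternative
-- what changed: extract_key_phrases's accumulator/flush scan is replaced by a staged index algorithm: first compute the list of cut positions (indices of non-phrase words, bracketed by -1 and len(words)), then slice the word list between each pair of consecutive cuts and keep the slices spanning >= 2 words; the summary helper is folded into one candidate-then-clip expression.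
import Mathlib
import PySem

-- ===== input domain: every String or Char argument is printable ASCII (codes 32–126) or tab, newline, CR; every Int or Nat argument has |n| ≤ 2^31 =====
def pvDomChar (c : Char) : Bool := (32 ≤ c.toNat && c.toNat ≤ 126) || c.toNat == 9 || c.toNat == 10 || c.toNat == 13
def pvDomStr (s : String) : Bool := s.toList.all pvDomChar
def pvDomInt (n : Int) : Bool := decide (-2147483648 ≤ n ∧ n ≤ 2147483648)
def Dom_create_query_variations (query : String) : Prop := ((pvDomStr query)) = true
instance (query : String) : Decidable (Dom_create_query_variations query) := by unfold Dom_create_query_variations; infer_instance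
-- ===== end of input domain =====

-- B replaces A's accumulator/flush phrase scan by a staged index algorithm: compute the cut
-- positions (indices of non-phrase words, bracketed by -1 and len), then slice the word list
-- between consecutive cuts and keep slices spanning >= 2 words (alternative decomposition).

-- ===== PORT A =====
def pvStopA : PySem.Set String :=
  PySem.Set.ofList ["the", "a", "an", "and", "or", "but", "in", "on", "at", "to", "for", "of", "with", "by"]

-- body of A's `for word in words:` loop, state = (key_phrases, current_phrase)
def pvStepA (st : List String × List String) (word : String) : List String × List String :=
  if !PySem.Set.contains pvStopA word && decide (2 < PySem.Str.len word) then
    (st.1, st.2 ++ [word])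
  else if st.2 ≠ [] then
    (if 2 ≤ PySem.List.len st.2 then st.1 ++ [PySem.Str.join " " st.2] else st.1, [])
  else st

def extract_key_phrases (query : String) : List String :=
  let words := PySem.Str.split₀ (PySem.Str.lower query)
  let st := words.foldl pvStepA ([], [])
  if st.2 ≠ [] ∧ 2 ≤ PySem.List.len st.2 then st.1 ++ [PySem.Str.join " " st.2] else st.1

def summarize_long_query (query : String) (max_length : Int) : String :=
  if PySem.Str.len query ≤ max_length then query
  else
    let sentences := (PySem.Str.split? query ". ").getD []   -- sep ≠ "", so split? is always some
    if PySem.List.len sentences ≤ 2 then PySem.Str.slice query none (some max_length) ++ "..."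
    else
      let summary := PySem.List.pyGetD sentences 0 "" ++ ". " ++ PySem.List.pyGetD sentences (-1) ""
      if max_length < PySem.Str.len summary then PySem.Str.slice summary none (some max_length) ++ "..."
      else summary

def create_query_variations (query : String) : List String :=
  let variations := [query]
  let key_phrases := extract_key_phrases query
  let variations := (PySem.List.slice key_phrases none (some 3)).foldl (fun acc p => acc ++ [p]) variations
  if 500 < PySem.Str.len query then variations ++ [summarize_long_query query 200] else variations

-- ===== PORT B =====
-- Source B's _keep (same stop-word set literal)
def pvKeepB (w : String) : Bool := !PySem.Set.contains pvStopA w && decide (2 < PySem.Str.len w)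

-- Source B's _summarize
def pvSummarizeB (query : String) (max_length : Int) : String :=
  let sentences := (PySem.Str.split? query ". ").getD []   -- sep ≠ "", so split? is always some
  let s := if PySem.List.len sentences ≤ 2 then query
           else PySem.List.pyGetD sentences 0 "" ++ ". " ++ PySem.List.pyGetD sentences (-1) ""
  if PySem.Str.len s ≤ max_length then s else PySem.Str.slice s none (some max_length) ++ "..."

def create_query_variations_alt (query : String) : List String :=
  let words := PySem.Str.split₀ (PySem.Str.lower query)
  -- cuts = [-1] + [i for i, w in enumerate(words) if not _keep(w)] + [len(words)]
  let cuts : List Int :=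
    [-1] ++ (PySem.List.enumerate words 0).filterMap
      (fun p => if pvKeepB p.2 then none else some p.1) ++ [(words.length : Int)]
  -- phrases = [' '.join(words[i+1:j]) for i, j in zip(cuts, cuts[1:]) if j - i > 2]
  let phrases := (cuts.zip (PySem.List.slice cuts (some 1) none)).filterMap
    (fun p => if 2 < p.2 - p.1 then
        some (PySem.Str.join " " (PySem.List.slice words (some (p.1 + 1)) (some p.2)))
      else none)
  ([query] ++ PySem.List.slice phrases none (some 3)) ++
    (if 500 < PySem.Str.len query then [pvSummarizeB query 200] else [])

-- ===== PRECONDITION & SPEC =====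
def Spec_create_query_variations (query : String) (out : List String) : Prop := out = create_query_variations_alt query
instance (query : String) (out : List String) : Decidable (Spec_create_query_variations query out) := by unfold Spec_create_query_variations; infer_instance

-- ===== CLAIM (what is proved, stated in full; the proofs are below) =====
def Claim_equal_create_query_variations : Prop := ∀ (query : String), Dom_create_query_variations query → Spec_create_query_variations query (create_query_variations query)

-- ===== LEMMAS AND PROOFS =====

-- common specification of the phrase list: cur is the pending run of keep-words
def pvFlush (cur : List String) : List String :=
  if 2 ≤ cur.length then [PySem.Str.join " " cur] else []

def pvPhrases : List String → List String → List String
  | cur, [] => pvFlush cur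
  | cur, w :: ws => if pvKeepB w then pvPhrases (cur ++ [w]) ws else pvFlush cur ++ pvPhrases [] ws

theorem pvCond_eq (w : String) :
    (!PySem.Set.contains pvStopA w && decide (2 < PySem.Str.len w)) = pvKeepB w := rfl

-- A's loop + final flush computes kp ++ pvPhrases cur ws
theorem pvStepA_spec (ws : List String) : ∀ (kp cur : List String),
    (let st := ws.foldl pvStepA (kp, cur);
     if st.2 ≠ [] ∧ 2 ≤ PySem.List.len st.2 then st.1 ++ [PySem.Str.join " " st.2] else st.1)
    = kp ++ pvPhrases cur ws := by
  induction ws with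
  | nil =>
    intro kp cur
    simp only [List.foldl_nil, pvPhrases, pvFlush, PySem.List.len_eq]
    by_cases h : 2 ≤ cur.length
    · have hc : cur ≠ [] := by intro hc; subst hc; simp at h
      rw [if_pos ⟨hc, by exact_mod_cast h⟩, if_pos h]
    · rw [if_neg, if_neg h, List.append_nil]
      rintro ⟨-, h2⟩
      exact h (by exact_mod_cast h2)
  | cons w ws ih =>
    intro kp cur
    simp only [List.foldl_cons]
    by_cases hk : pvKeepB w = true
    · rw [show pvStepA (kp, cur) w = (kp, cur ++ [w]) from by
        simp only [pvStepA, pvCond_eq, hk]; simp]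
      rw [ih kp (cur ++ [w])]
      simp [pvPhrases, hk]
    · have hk' : pvKeepB w = false := by simpa using hk
      by_cases hc : cur = []
      · subst hc
        rw [show pvStepA (kp, ([] : List String)) w = (kp, []) from by
          simp only [pvStepA, pvCond_eq, hk']; simp]
        rw [ih kp []]
        simp [pvPhrases, hk', pvFlush]
      · rw [show pvStepA (kp, cur) w
            = (if 2 ≤ PySem.List.len cur then kp ++ [PySem.Str.join " " cur] else kp, []) from by
          simp only [pvStepA, pvCond_eq, hk']; simp [hc]]
        rw [ih _ []]
        simp only [pvPhrases, hk', pvFlush, PySem.List.len_eq, Bool.false_eq_true, if_false]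
        by_cases h2 : 2 ≤ cur.length
        · rw [if_pos (by exact_mod_cast h2 : (2:Int) ≤ (cur.length : Int)), if_pos h2,
            List.append_assoc]
        · rw [if_neg (fun hh => h2 (by exact_mod_cast hh)), if_neg h2]
          simp

-- B side: recursive form of the inner cut list (positions of the non-keep words, as Int)
def pvBnd : List String → List Int
  | [] => []
  | w :: ws => if pvKeepB w then (pvBnd ws).map (· + 1) else 0 :: (pvBnd ws).map (· + 1)

theorem pvBnd_nonneg (ws : List String) : ∀ x ∈ pvBnd ws, 0 ≤ x := by
  induction ws with
  | nil => simp [pvBnd]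
  | cons w ws ih =>
    intro x hx
    simp only [pvBnd] at hx
    by_cases hk : pvKeepB w = true
    · rw [if_pos hk] at hx
      obtain ⟨k, hk2, rfl⟩ := List.mem_map.mp hx
      have := ih k hk2
      omega
    · rw [if_neg hk] at hx
      rcases List.mem_cons.mp hx with rfl | hx'
      · omega
      · obtain ⟨k, hk2, rfl⟩ := List.mem_map.mp hx'
        have := ih k hk2
        omega

-- the enumerate/filterMap of the port computes pvBnd shifted by the start offset
theorem pvBnd_eq (ws : List String) : ∀ (s : Int),
    (PySem.List.enumerate ws s).filterMap (fun p => if pvKeepB p.2 then none else some p.1)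
    = (pvBnd ws).map (· + s) := by
  induction ws with
  | nil => intro s; simp [PySem.List.enumerate_nil, pvBnd]
  | cons w ws ih =>
    intro s
    rw [PySem.List.enumerate_cons, List.filterMap_cons, ih (s + 1)]
    by_cases hk : pvKeepB w = true
    · simp only [pvBnd, hk, if_true, List.map_map]
      apply List.map_congr_left
      intro k _
      simp only [Function.comp_apply]
      ring
    · have hk' : pvKeepB w = false := by simpa using hk
      simp only [pvBnd, hk', Bool.false_eq_true, if_false, List.map_cons, List.map_map]
      congr 1
      · omega
      · apply List.map_congr_left
        intro k _
        simp only [Function.comp_apply]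
        ring

-- the phrase list B builds from a cut list (abstracted over the cut list)
def pvCutsJoin (ws : List String) (L : List Int) : List String :=
  (L.zip L.tail).filterMap
    (fun p => if 2 < p.2 - p.1 then
        some (PySem.Str.join " " (PySem.List.slice ws (some (p.1 + 1)) (some p.2)))
      else none)

-- slices between cuts shifted by m into ws are slices between the cuts into ws.drop m
theorem pvSlice_shift (ws : List String) (m : Nat) (a b : Int) (ha : 0 ≤ a) (hb : 0 ≤ b) :
    PySem.List.slice ws (some (a + m)) (some (b + m)) = PySem.List.slice (ws.drop m) (some a) (some b) := by
  rw [PySem.List.slice_toNat ws (by omega) (by omega), PySem.List.slice_toNat (ws.drop m) ha hb,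
    List.drop_drop,
    show (a + (m : Int)).toNat = m + a.toNat from by omega,
    show (b + (m : Int)).toNat - (m + a.toNat) = b.toNat - a.toNat from by omega]

theorem pvCutsJoin_shift (L : List Int) (ws : List String) (m : Nat)
    (h1 : ∀ x ∈ L, -1 ≤ x) (h2 : ∀ x ∈ L.tail, 0 ≤ x) :
    pvCutsJoin ws (L.map (· + (m : Int))) = pvCutsJoin (ws.drop m) L := by
  induction L with
  | nil => rfl
  | cons a L ih =>
    match L with
    | [] => rfl
    | b :: L =>
      have ha : -1 ≤ a := h1 a (by simp)
      have hb : 0 ≤ b := h2 b (by simp)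
      simp only [pvCutsJoin, List.map_cons, List.tail_cons, List.zip_cons_cons,
        List.filterMap_cons] at ih ⊢
      have hsl : PySem.List.slice ws (some (a + (m : Int) + 1)) (some (b + (m : Int)))
          = PySem.List.slice (ws.drop m) (some (a + 1)) (some b) := by
        have := pvSlice_shift ws m (a + 1) b (by omega) hb
        rw [show a + (m : Int) + 1 = a + 1 + (m : Int) by ring, this]
      have hiff : (2 < b + (m : Int) - (a + (m : Int))) ↔ (2 < b - a) := by omega
      have hhead : (if 2 < b + (m : Int) - (a + (m : Int)) then
            some (PySem.Str.join " " (PySem.List.slice ws (some (a + (m : Int) + 1)) (some (b + (m : Int)))))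
          else none)
          = (if 2 < b - a then
            some (PySem.Str.join " " (PySem.List.slice (ws.drop m) (some (a + 1)) (some b)))
          else none) := by
        by_cases hc : 2 < b - a
        · rw [if_pos (hiff.mpr hc), if_pos hc, hsl]
        · rw [if_neg (fun h => hc (hiff.mp h)), if_neg hc]
      have ih' := ih (fun x hx => h1 x (List.mem_cons_of_mem _ hx))
        (fun x hx => h2 x (by
          simp only [List.tail_cons] at hx ⊢
          exact List.mem_cons_of_mem b hx))
      rw [hhead, ih']

-- pvBnd of a list whose words are all keep-words is empty
theorem pvBnd_all_keep (ws : List String) (h : ∀ w ∈ ws, pvKeepB w = true) : pvBnd ws = [] := by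
  induction ws with
  | nil => rfl
  | cons w ws ih =>
    simp only [pvBnd, h w (by simp), if_true]
    rw [ih (fun x hx => h x (List.mem_cons_of_mem _ hx))]
    rfl

-- pvBnd across the first non-keep word
theorem pvBnd_split (t : List String) (z : String) (zs : List String)
    (ht : ∀ w ∈ t, pvKeepB w = true) (hz : pvKeepB z = false) :
    pvBnd (t ++ z :: zs) = (t.length : Int) :: (pvBnd zs).map (· + ((t.length : Int) + 1)) := by
  induction t with
  | nil =>
    simp only [List.nil_append, pvBnd, hz, Bool.false_eq_true, if_false, List.length_nil]
    norm_num
  | cons w t ih =>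
    simp only [List.cons_append, pvBnd, ht w (by simp), if_true]
    rw [ih (fun x hx => ht x (List.mem_cons_of_mem _ hx))]
    simp only [List.map_cons, List.map_map, List.length_cons]
    rw [List.cons_eq_cons]
    refine ⟨by push_cast; ring, ?_⟩
    apply List.map_congr_left
    intro k _
    simp only [Function.comp_apply]
    push_cast
    ring

-- pvPhrases across a maximal keep-prefix followed by a non-keep word
theorem pvPhrases_keep_prefix (t : List String) (ht : ∀ w ∈ t, pvKeepB w = true)
    (z : String) (hz : pvKeepB z = false) (zs : List String) : ∀ (cur : List String),
    pvPhrases cur (t ++ z :: zs) = pvFlush (cur ++ t) ++ pvPhrases [] zs := by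
  induction t with
  | nil =>
    intro cur
    simp [pvPhrases, hz]
  | cons w t iht =>
    intro cur
    simp only [List.cons_append, pvPhrases, ht w (by simp), if_true]
    rw [iht (fun x hx => ht x (List.mem_cons_of_mem _ hx)) (cur ++ [w])]
    simp

-- pvPhrases of an all-keep list is a single flush
theorem pvPhrases_all_keep (us : List String) : ∀ (cur : List String),
    (∀ u ∈ us, pvKeepB u = true) → pvPhrases cur us = pvFlush (cur ++ us) := by
  induction us with
  | nil => intro cur _; simp [pvPhrases]
  | cons u us ihu =>
    intro cur hu
    simp only [pvPhrases, hu u (by simp), if_true]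
    rw [ihu (cur ++ [u]) (fun x hx => hu x (List.mem_cons_of_mem _ hx))]
    simp

-- the head of a non-empty dropWhile fails the predicate
theorem pvDropWhile_head_false {p : String → Bool} {ws zs : List String} {z : String}
    (h : ws.dropWhile p = z :: zs) : p z = false := by
  induction ws with
  | nil => simp at h
  | cons w ws ih =>
    rw [List.dropWhile_cons] at h
    by_cases hk : p w = true
    · exact ih (by simpa [hk] using h)
    · have hk' : p w = false := by simpa using hk
      rw [hk'] at h
      simp only [Bool.false_eq_true, if_false] at h
      injection h with h1 h2
      rw [← h1]
      exact hk'

-- MAIN: B's cut-pair computation equals the common phrase spec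
theorem pvCuts_spec : ∀ (n : Nat) (ws : List String), ws.length ≤ n →
    pvCutsJoin ws (-1 :: pvBnd ws ++ [(ws.length : Int)]) = pvPhrases [] ws := by
  intro n
  induction n with
  | zero =>
    intro ws hw
    rw [List.length_eq_zero_iff.mp (Nat.le_zero.mp hw)]
    decide
  | succ n ih =>
    intro ws hw
    by_cases hall : ∀ w ∈ ws, pvKeepB w = true
    · -- no cut inside: one pair (-1, len); the slice is ws itself
      rw [pvBnd_all_keep ws hall, pvPhrases_all_keep ws [] hall]
      simp only [List.nil_append, pvCutsJoin, List.singleton_append, List.tail_cons,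
        List.zip_cons_cons, List.zip_nil_right, List.filterMap_cons, List.filterMap_nil]
      have hsl : PySem.List.slice ws (some (-1 + 1)) (some ((ws.length : Int))) = ws := by
        rw [show (-1 + 1 : Int) = ((0 : Nat) : Int) by norm_num, PySem.List.slice_natCast]
        simp
      rw [hsl]
      unfold pvFlush
      by_cases h2 : 2 ≤ ws.length
      · rw [if_pos (by omega), if_pos h2]
      · rw [if_neg (by omega), if_neg h2]
    · -- there is a first non-keep word: ws = t ++ z :: zs with t the maximal keep-prefix
      have hdw : ws.dropWhile pvKeepB ≠ [] := by
        intro hd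
        rw [List.dropWhile_eq_nil_iff] at hd
        exact hall hd
      obtain ⟨z, zs, hzzs⟩ := List.exists_cons_of_ne_nil hdw
      set t := ws.takeWhile pvKeepB with htdef
      have hws : ws = t ++ z :: zs := by
        rw [htdef, ← hzzs, List.takeWhile_append_dropWhile]
      have ht : ∀ w ∈ t, pvKeepB w = true := fun w hw => List.mem_takeWhile_imp hw
      have hz : pvKeepB z = false := pvDropWhile_head_false hzzs
      rw [hws, pvBnd_split t z zs ht hz]
      -- peel the first pair (-1, t.length)
      rw [show (-1 : Int) :: ((t.length : Int) :: (pvBnd zs).map (· + ((t.length : Int) + 1)))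
            ++ [((t ++ z :: zs).length : Int)]
          = -1 :: (((t.length : Int) :: (pvBnd zs).map (· + ((t.length : Int) + 1)))
            ++ [((t ++ z :: zs).length : Int)]) from by simp]
      have hpeel : ∀ (c : Int) (rest : List Int),
          pvCutsJoin (t ++ z :: zs) (-1 :: (c :: rest))
          = (if 2 < c - (-1) then
              [PySem.Str.join " " (PySem.List.slice (t ++ z :: zs) (some (-1 + 1)) (some c))]
             else [])
            ++ pvCutsJoin (t ++ z :: zs) (c :: rest) := by
        intro c rest
        simp only [pvCutsJoin, List.tail_cons, List.zip_cons_cons, List.filterMap_cons]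
        by_cases hc : (2 : Int) ≤ c <;> simp [hc]
      rw [show ((t.length : Int) :: (pvBnd zs).map (· + ((t.length : Int) + 1)))
            ++ [((t ++ z :: zs).length : Int)]
          = (t.length : Int) :: ((pvBnd zs).map (· + ((t.length : Int) + 1))
            ++ [((t ++ z :: zs).length : Int)]) from by simp]
      rw [hpeel]
      -- the first slice is exactly t
      have hslt : PySem.List.slice (t ++ z :: zs) (some (-1 + 1)) (some (t.length : Int)) = t := by
        rw [show (-1 + 1 : Int) = ((0 : Nat) : Int) by norm_num, PySem.List.slice_natCast]
        simp
      rw [hslt]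
      -- the remaining pairs are zs's cut list shifted by t.length + 1
      have hmap : (pvBnd zs).map (· + ((t.length : Int) + 1))
          = (pvBnd zs).map (· + ((t.length + 1 : Nat) : Int)) := by
        apply List.map_congr_left
        intro k _
        push_cast
        ring
      have hLeq : (t.length : Int) :: ((pvBnd zs).map (· + ((t.length : Int) + 1))
            ++ [((t ++ z :: zs).length : Int)])
          = ((-1 : Int) :: (pvBnd zs ++ [(zs.length : Int)])).map (· + ((t.length + 1 : Nat) : Int)) := by
        simp only [List.map_cons, List.map_append, List.map_nil]
        rw [List.cons_eq_cons]
        refine ⟨by push_cast; ring, ?_⟩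
        rw [hmap, show ((t ++ z :: zs).length : Int) = (zs.length : Int) + ((t.length + 1 : Nat) : Int) from by
          simp only [List.length_append, List.length_cons]; push_cast; ring]
      rw [hLeq, pvCutsJoin_shift _ _ _ ?h1 ?h2]
      case h1 =>
        intro x hx
        rcases List.mem_cons.mp hx with rfl | hx'
        · omega
        rcases List.mem_append.mp hx' with h | h
        · have := pvBnd_nonneg zs x h; omega
        · simp only [List.mem_singleton] at h; omega
      case h2 =>
        intro x hx
        simp only [List.tail_cons] at hx
        rcases List.mem_append.mp hx with h | h
        · exact pvBnd_nonneg zs x h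
        · simp only [List.mem_singleton] at h; omega
      have hdrop : (t ++ z :: zs).drop (t.length + 1) = zs := by
        rw [show t.length + 1 = (t ++ [z]).length by simp,
          show t ++ z :: zs = (t ++ [z]) ++ zs by simp, List.drop_left]
      rw [hdrop]
      have hlzs : zs.length ≤ n := by
        have : (t ++ z :: zs).length ≤ n + 1 := hws ▸ hw
        simp only [List.length_append, List.length_cons] at this
        omega
      rw [show -1 :: (pvBnd zs ++ [(zs.length : Int)]) = -1 :: pvBnd zs ++ [(zs.length : Int)] from by simp]
      rw [ih zs hlzs, pvPhrases_keep_prefix t ht z hz zs []]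
      simp only [List.nil_append]
      unfold pvFlush
      by_cases h2 : 2 ≤ t.length
      · rw [if_pos (by omega), if_pos h2]
      · rw [if_neg (by omega), if_neg h2]

-- the two summaries agree on every query longer than 500 characters
theorem pvSummarize_eq (query : String) (h : 500 < PySem.Str.len query) :
    summarize_long_query query 200 = pvSummarizeB query 200 := by
  unfold summarize_long_query pvSummarizeB
  rw [if_neg (by omega)]
  by_cases hs : PySem.List.len ((PySem.Str.split? query ". ").getD []) ≤ 2
  · rw [if_pos hs]
    simp only [hs, if_pos]
    rw [if_neg (by omega)]
  · rw [if_neg hs]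
    simp only [hs, if_false]
    by_cases hl : PySem.Str.len (PySem.List.pyGetD ((PySem.Str.split? query ". ").getD []) 0 ""
        ++ ". " ++ PySem.List.pyGetD ((PySem.Str.split? query ". ").getD []) (-1) "") ≤ 200
    · rw [if_neg (by omega), if_pos hl]
    · rw [if_pos (by omega), if_neg hl]

-- ===== VERDICT (by name: the statement is the Claim_ definition above) =====
theorem create_query_variations_spec : Claim_equal_create_query_variations := by
  intro query _
  unfold Spec_create_query_variations create_query_variations create_query_variations_alt
    extract_key_phrases
  have hkp := pvStepA_spec (PySem.Str.split₀ (PySem.Str.lower query)) [] []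
  simp only [List.nil_append] at hkp
  have hbnd := pvBnd_eq (PySem.Str.split₀ (PySem.Str.lower query)) 0
  simp only [add_zero] at hbnd
  have hcuts := pvCuts_spec (PySem.Str.split₀ (PySem.Str.lower query)).length
    (PySem.Str.split₀ (PySem.Str.lower query)) le_rfl
  simp only [hkp, hbnd, List.map_id', PySem.List.slice_from_one, PySem.List.foldl_append_singleton]
  rw [show ([(-1 : Int)] ++ pvBnd (PySem.Str.split₀ (PySem.Str.lower query))
        ++ [((PySem.Str.split₀ (PySem.Str.lower query)).length : Int)])
      = (-1 : Int) :: pvBnd (PySem.Str.split₀ (PySem.Str.lower query))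
        ++ [((PySem.Str.split₀ (PySem.Str.lower query)).length : Int)] from by simp]
  rw [show ∀ (L : List Int) (ws : List String), (List.zip L (List.tail L)).filterMap
        (fun p => if 2 < p.2 - p.1 then
            some (PySem.Str.join " " (PySem.List.slice ws (some (p.1 + 1)) (some p.2)))
          else none) = pvCutsJoin ws L from fun _ _ => rfl]
  rw [hcuts]
  have hslice : ∀ (l : List String), PySem.List.slice l none (some 3) = l.take 3 := by
    intro l; rw [PySem.List.slice_to _ (by omega)]; rfl
  simp only [hslice]
  by_cases h5 : 500 < PySem.Str.len query
  · have h5' : 500 < query.length := by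
      have h := h5
      rw [PySem.Str.len_eq] at h
      exact_mod_cast h
    simp [h5', pvSummarize_eq query h5]
  · have h5' : ¬ 500 < query.length := by
      intro h
      apply h5
      rw [PySem.Str.len_eq]
      exact_mod_cast h
    simp [h5']
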